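-- pv_equiv track=rewrite | github.com/behackl/manim-content | 2022-04_partitions.py | unique_to_odd
-- ===== SOURCE A (Python) =====
-- from collections import defaultdict
--
-- def unique_to_odd(partition):
--     r"""Given a partition with unique parts, returns the
--     corresponding (w.r.t. Glaisher's bijection) partition
--     with only odd parts.
--     """
--     assert len(partition) == len(set(partition))
--     odd_parts_map = defaultdict(int)
--     for part in partition:
--         j = 0
--         while part % 2 == 0:
--             part //= 2
--             j += 1
--         odd_parts_map[part] += 2**j
--     return tuple(sum([[p]*v for p, v in sorted(odd_parts_map.items(), reverse=True)], []))
-- ===== SOURCE B (Python) =====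
-- def unique_to_odd(partition):
--     r"""Given a partition with unique parts, returns the
--     corresponding (w.r.t. Glaisher's bijection) partition
--     with only odd parts.
--     """
--     assert len(partition) == len(set(partition))
--     parts = list(partition)
--     while any(p % 2 == 0 for p in parts):
--         parts = [q for p in parts for q in ([p] if p % 2 else [p // 2, p // 2])]
--     return tuple(sorted(parts, reverse=True))
-- ===== Notes on version B (the rewrite author's own statement) =====
-- stated objective: alternative
-- what changed: Replaces A's per-part odd-core/exponent extraction aggregated in a defaultdict and re-expanded over sorted keys by the classic iterative Glaisher step: repeatedly split every even part 2k into two parts k until all parts are odd, then sort the resulting list descending.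
import Mathlib
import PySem

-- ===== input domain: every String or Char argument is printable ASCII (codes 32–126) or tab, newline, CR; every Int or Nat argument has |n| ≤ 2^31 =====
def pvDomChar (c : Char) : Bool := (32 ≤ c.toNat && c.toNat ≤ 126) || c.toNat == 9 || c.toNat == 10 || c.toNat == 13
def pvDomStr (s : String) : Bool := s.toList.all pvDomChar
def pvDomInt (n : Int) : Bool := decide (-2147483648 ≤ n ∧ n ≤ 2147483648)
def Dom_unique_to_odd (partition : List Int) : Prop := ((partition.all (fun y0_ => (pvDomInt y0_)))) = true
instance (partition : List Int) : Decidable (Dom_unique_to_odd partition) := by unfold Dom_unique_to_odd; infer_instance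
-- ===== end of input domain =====

-- B replaces A's odd-core/exponent extraction + defaultdict + sorted-keys re-expansion by the
-- iterative Glaisher step: repeatedly split every even part 2k into two parts k until all parts
-- are odd, then sort descending once (alternative algorithm, similar cost).


-- ===== PORT A =====
-- A's inner while-loop: strip factors of 2, count them in j.  The loop is bounded by
-- fuel = |part| (more than the number of factors of 2 of any part ≠ 0) and stops at
-- part = 0, purely to make it total: Python's loop never terminates on part = 0, and
-- Pre_ excludes 0.
def pvOddCoreGo : Nat → Int → Nat → Int × Nat
  | 0, part, j => (part, j)
  | fuel + 1, part, j =>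
      if PySem.Int.mod part 2 = 0 ∧ part ≠ 0 then
        pvOddCoreGo fuel (PySem.Int.floordiv part 2) (j + 1)
      else (part, j)

def pvOddCore (part : Int) (j : Nat) : Int × Nat :=
  pvOddCoreGo part.natAbs part j

-- A: aggregate 2**j into a defaultdict keyed by the odd core, then expand the
-- key-sorted (reverse=True, tuples compare lexicographically) items.
def unique_to_odd (partition : List Int) : List Int :=
  ((PySem.List.sorted2
      (partition.foldl
        (fun d part => d.modify (pvOddCore part 0).1 0 (fun v => v + 2 ^ (pvOddCore part 0).2))
        PySem.Dict.empty).items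
      (fun pv => pv.1) (fun pv => pv.2) true).map
    (fun pv => PySem.List.pyRepeat [pv.1] pv.2)).foldl (fun acc x => acc ++ x) []

-- ===== PORT B =====
-- one pass of B's while-loop body: each even part 2k becomes two parts k, odd parts stay
def pvSplitPass (parts : List Int) : List Int :=
  parts.flatMap (fun p =>
    if PySem.Int.mod p 2 ≠ 0 then [p]
    else [PySem.Int.floordiv p 2, PySem.Int.floordiv p 2])

-- B's while-loop ('while any part is even: split all even parts').  fuel bounds the number
-- of passes (Σ|p| passes more than suffice for nonzero parts), purely to make it total:
-- Python's loop never terminates when 0 is a part, and Pre_ excludes 0.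
def pvSplitLoop : Nat → List Int → List Int
  | 0, parts => parts
  | fuel + 1, parts =>
      if parts.any (fun p => PySem.Int.mod p 2 = 0) then
        pvSplitLoop fuel (pvSplitPass parts)
      else parts

def unique_to_odd_alt (partition : List Int) : List Int :=
  PySem.List.sorted
    (pvSplitLoop (partition.map Int.natAbs).sum partition)
    (fun x => x) true

-- ===== PRECONDITION & SPEC =====
-- A raises AssertionError on duplicate parts, and both while-loops diverge on part = 0;
-- Pre_ excludes exactly those inputs.
def Pre_unique_to_odd (partition : List Int) : Prop :=
  partition.Nodup ∧ (0 : Int) ∉ partition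
instance (partition : List Int) : Decidable (Pre_unique_to_odd partition) := by
  unfold Pre_unique_to_odd; infer_instance

def pvWitness_unique_to_odd : List Int := [6, 3, 1]

def Spec_unique_to_odd (partition : List Int) (out : List Int) : Prop := out = unique_to_odd_alt partition
instance (partition : List Int) (out : List Int) : Decidable (Spec_unique_to_odd partition out) := by unfold Spec_unique_to_odd; infer_instance

-- ===== CLAIM (what is proved, stated in full; the proofs are below) =====
def Claim_equal_unique_to_odd : Prop := ∀ (partition : List Int), Dom_unique_to_odd partition → Pre_unique_to_odd partition → Spec_unique_to_odd partition (unique_to_odd partition)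

-- ===== LEMMAS AND PROOFS =====

def pvCore (part : Int) : Int := (pvOddCore part 0).1
def pvExp (part : Int) : Nat := (pvOddCore part 0).2
def pvWt (part : Int) : Int := 2 ^ pvExp part
def pvExpand (part : Int) : List Int := List.replicate (pvWt part).toNat (pvCore part)
def pvS (partition : List Int) (k : Int) : Int :=
  ((partition.filter (fun part => pvCore part = k)).map pvWt).sum

lemma pvWt_pos (part : Int) : 0 < pvWt part := by
  unfold pvWt; positivity

lemma pvS_nonneg (partition : List Int) (k : Int) : 0 ≤ pvS partition k := by
  unfold pvS
  apply List.sum_nonneg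
  intro x hx
  obtain ⟨p, _, rfl⟩ := List.mem_map.mp hx
  exact (pvWt_pos p).le

lemma pvS_cons (x : Int) (l : List Int) (a : Int) :
    pvS (x :: l) a = if pvCore x = a then pvWt x + pvS l a else pvS l a := by
  simp only [pvS, List.filter_cons]
  by_cases hx : pvCore x = a <;> simp [hx]

-- ---- the shared odd-core function: shift, fuel and step lemmas ----

lemma pvOddCoreGo_succ (f : Nat) (p : Int) (j : Nat) :
    pvOddCoreGo (f + 1) p j =
      if PySem.Int.mod p 2 = 0 ∧ p ≠ 0 then
        pvOddCoreGo f (PySem.Int.floordiv p 2) (j + 1)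
      else (p, j) := rfl

lemma pvOddCoreGo_j : ∀ (f : Nat) (p : Int) (j : Nat),
    pvOddCoreGo f p j = ((pvOddCoreGo f p 0).1, j + (pvOddCoreGo f p 0).2) := by
  intro f
  induction f with
  | zero => intro p j; rfl
  | succ f ih =>
      intro p j
      by_cases h : PySem.Int.mod p 2 = 0 ∧ p ≠ 0
      · rw [pvOddCoreGo_succ, pvOddCoreGo_succ, if_pos h, if_pos h,
          ih _ (j + 1), ih _ 1]
        refine Prod.ext rfl ?_
        show j + 1 + _ = j + (1 + _)
        omega
      · rw [pvOddCoreGo_succ, pvOddCoreGo_succ, if_neg h, if_neg h]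
        simp

lemma pvOddCoreGo_le (f : Nat) : ∀ (p : Int) (j : Nat), (pvOddCoreGo f p j).2 ≤ j + f := by
  induction f with
  | zero => intro p j; exact Nat.le_refl j
  | succ f ih =>
      intro p j
      by_cases h : PySem.Int.mod p 2 = 0 ∧ p ≠ 0
      · rw [pvOddCoreGo_succ, if_pos h]
        calc (pvOddCoreGo f (PySem.Int.floordiv p 2) (j + 1)).2 ≤ (j + 1) + f := ih _ _
          _ ≤ j + (f + 1) := by omega
      · rw [pvOddCoreGo_succ, if_neg h]
        exact Nat.le_add_right j (f + 1)

lemma pvExp_le_natAbs (p : Int) : pvExp p ≤ p.natAbs := by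
  have := pvOddCoreGo_le p.natAbs p 0
  simpa [pvExp, pvOddCore] using this

lemma pv_half_facts {p : Int} (hp : p ≠ 0) (he : PySem.Int.mod p 2 = 0) :
    PySem.Int.floordiv p 2 * 2 = p ∧ (PySem.Int.floordiv p 2).natAbs * 2 = p.natAbs ∧
      PySem.Int.floordiv p 2 ≠ 0 ∧ 2 ≤ p.natAbs := by
  have h := PySem.Int.floordiv_mul_add_mod p 2
  rw [he] at h
  set q := PySem.Int.floordiv p 2 with hq
  have hq2 : q * 2 = p := by omega
  have hqn : q ≠ 0 := by
    intro h0
    rw [h0] at hq2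
    exact hp (by omega)
  have habs : q.natAbs * 2 = p.natAbs := by
    rw [← hq2, Int.natAbs_mul]; rfl
  refine ⟨hq2, habs, hqn, ?_⟩
  have : 1 ≤ q.natAbs := Int.natAbs_pos.mpr hqn
  omega

lemma pvOddCoreGo_fuel_succ : ∀ (f : Nat) (p : Int) (j : Nat), p ≠ 0 → p.natAbs ≤ f →
    pvOddCoreGo (f + 1) p j = pvOddCoreGo f p j := by
  intro f
  induction f with
  | zero =>
      intro p j hp h0
      exact absurd (Int.natAbs_eq_zero.mp (Nat.le_zero.mp h0)) hp
  | succ f ih =>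
      intro p j hp hf
      by_cases h : PySem.Int.mod p 2 = 0 ∧ p ≠ 0
      · have hq := pv_half_facts hp h.1
        rw [pvOddCoreGo_succ (f + 1) p j, pvOddCoreGo_succ f p j, if_pos h, if_pos h]
        exact ih _ _ hq.2.2.1 (by omega)
      · rw [pvOddCoreGo_succ (f + 1) p j, pvOddCoreGo_succ f p j, if_neg h, if_neg h]

lemma pvOddCoreGo_fuel : ∀ (k f : Nat) (p : Int) (j : Nat), p ≠ 0 → p.natAbs ≤ f →
    pvOddCoreGo (f + k) p j = pvOddCoreGo f p j := by
  intro k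
  induction k with
  | zero => intro f p j _ _; rfl
  | succ k ih =>
      intro f p j hp hf
      have : f + (k + 1) = (f + k) + 1 := by omega
      rw [this, pvOddCoreGo_fuel_succ (f + k) p j hp (by omega), ih f p j hp hf]

lemma pvOddCore_eq_go {p : Int} {f : Nat} (hp : p ≠ 0) (hf : p.natAbs ≤ f) (j : Nat) :
    pvOddCoreGo f p j = pvOddCore p j := by
  unfold pvOddCore
  have : f = p.natAbs + (f - p.natAbs) := by omega
  rw [this, pvOddCoreGo_fuel _ _ _ _ hp le_rfl]

lemma pvOddCore_even {p : Int} (hp : p ≠ 0) (he : PySem.Int.mod p 2 = 0) :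
    pvCore p = pvCore (PySem.Int.floordiv p 2) ∧
      pvExp p = pvExp (PySem.Int.floordiv p 2) + 1 := by
  obtain ⟨hq2, habs, hqn, h2⟩ := pv_half_facts hp he
  set q := PySem.Int.floordiv p 2 with hqdef
  have h1 : pvOddCore p 0 = pvOddCoreGo (p.natAbs - 1) q 1 := by
    unfold pvOddCore
    have hsplit : p.natAbs = (p.natAbs - 1) + 1 := by omega
    rw [hsplit, pvOddCoreGo_succ, if_pos ⟨he, hp⟩]
    rfl
  have h2' : pvOddCoreGo (p.natAbs - 1) q 1 = pvOddCore q 1 :=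
    pvOddCore_eq_go hqn (by omega) 1
  have h3 : pvOddCore q 1 = ((pvOddCore q 0).1, 1 + (pvOddCore q 0).2) := by
    unfold pvOddCore; exact pvOddCoreGo_j _ _ _
  constructor
  · show (pvOddCore p 0).1 = (pvOddCore q 0).1
    rw [h1, h2', h3]
  · show (pvOddCore p 0).2 = (pvOddCore q 0).2 + 1
    rw [h1, h2', h3]
    show 1 + (pvOddCore q 0).2 = _
    omega

lemma pvOddCore_odd {p : Int} (ho : PySem.Int.mod p 2 ≠ 0) : pvOddCore p 0 = (p, 0) := by
  unfold pvOddCore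
  cases hn : p.natAbs with
  | zero =>
      have : p = 0 := Int.natAbs_eq_zero.mp hn
      subst this; rfl
  | succ n =>
      rw [pvOddCoreGo_succ, if_neg]
      rintro ⟨hm, _⟩
      exact ho hm

lemma pvExpand_odd {p : Int} (ho : PySem.Int.mod p 2 ≠ 0) : pvExpand p = [p] := by
  unfold pvExpand pvWt pvCore pvExp
  rw [pvOddCore_odd ho]
  rfl

lemma pvExpand_even {p : Int} (hp : p ≠ 0) (he : PySem.Int.mod p 2 = 0) :
    pvExpand p = pvExpand (PySem.Int.floordiv p 2) ++ pvExpand (PySem.Int.floordiv p 2) := by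
  obtain ⟨hc, hx⟩ := pvOddCore_even hp he
  set q := PySem.Int.floordiv p 2
  unfold pvExpand pvWt
  rw [hc, hx, pow_succ]
  have h1 : (0:Int) < 2 ^ pvExp q := by positivity
  have h2 : ((2:Int) ^ pvExp q * 2).toNat = ((2:Int) ^ pvExp q).toNat + ((2:Int) ^ pvExp q).toNat := by
    omega
  rw [h2, List.replicate_add]

lemma pvExp_pos_of_even {p : Int} (hp : p ≠ 0) (he : PySem.Int.mod p 2 = 0) : 0 < pvExp p := by
  rw [(pvOddCore_even hp he).2]; omega

-- ---- B's loop computes the flat expansion ----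

lemma pvExpand_step {x : Int} (hx : x ≠ 0) :
    (if PySem.Int.mod x 2 ≠ 0 then [x]
      else [PySem.Int.floordiv x 2, PySem.Int.floordiv x 2]).flatMap pvExpand = pvExpand x := by
  by_cases ho : PySem.Int.mod x 2 ≠ 0
  · rw [if_pos ho, List.flatMap_cons, List.flatMap_nil, List.append_nil]
  · have he : PySem.Int.mod x 2 = 0 := not_not.mp ho
    rw [if_neg ho, List.flatMap_cons, List.flatMap_cons, List.flatMap_nil, List.append_nil,
      pvExpand_even hx he]

lemma pvSplitPass_expand : ∀ (parts : List Int), (∀ p ∈ parts, p ≠ 0) →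
    (pvSplitPass parts).flatMap pvExpand = parts.flatMap pvExpand := by
  intro parts
  induction parts with
  | nil => intro _; rfl
  | cons x l ih =>
      intro h
      have hx := h x (by simp)
      have hl := ih (fun p hp => h p (by simp [hp]))
      show ((if PySem.Int.mod x 2 ≠ 0 then [x]
          else [PySem.Int.floordiv x 2, PySem.Int.floordiv x 2]) ++ pvSplitPass l).flatMap pvExpand
        = pvExpand x ++ l.flatMap pvExpand
      rw [List.flatMap_append, pvExpand_step hx, hl]

lemma pvSplitPass_mem : ∀ (parts : List Int) (r : Int), r ∈ pvSplitPass parts →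
    ∃ p ∈ parts, (PySem.Int.mod p 2 ≠ 0 ∧ r = p) ∨
      (PySem.Int.mod p 2 = 0 ∧ r = PySem.Int.floordiv p 2) := by
  intro parts r hr
  obtain ⟨p, hp, hrp⟩ := List.mem_flatMap.mp hr
  refine ⟨p, hp, ?_⟩
  by_cases ho : PySem.Int.mod p 2 ≠ 0
  · rw [if_pos ho] at hrp
    left
    exact ⟨ho, by simpa using hrp⟩
  · rw [if_neg ho] at hrp
    right
    refine ⟨not_not.mp ho, ?_⟩
    rcases List.mem_cons.mp hrp with h | h
    · exact h
    · simpa using h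

lemma pv_flatMap_expand_of_odd : ∀ (parts : List Int),
    (∀ p ∈ parts, PySem.Int.mod p 2 ≠ 0) → parts.flatMap pvExpand = parts := by
  intro parts
  induction parts with
  | nil => intro _; rfl
  | cons x l ih =>
      intro h
      rw [List.flatMap_cons, pvExpand_odd (h x (by simp)), ih (fun p hp => h p (by simp [hp]))]
      rfl

lemma pvSplitLoop_eq : ∀ (fuel : Nat) (parts : List Int),
    (∀ p ∈ parts, p ≠ 0 ∧ pvExp p ≤ fuel) →
    pvSplitLoop fuel parts = parts.flatMap pvExpand := by
  intro fuel
  induction fuel with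
  | zero =>
      intro parts h
      have hodd : ∀ p ∈ parts, PySem.Int.mod p 2 ≠ 0 := by
        intro p hp he
        obtain ⟨hp0, hle⟩ := h p hp
        exact absurd (pvExp_pos_of_even hp0 he) (by omega)
      exact (pv_flatMap_expand_of_odd parts hodd).symm
  | succ fuel ih =>
      intro parts h
      by_cases hany : parts.any (fun p => decide (PySem.Int.mod p 2 = 0)) = true
      · rw [pvSplitLoop, if_pos hany]
        have hnext : ∀ r ∈ pvSplitPass parts, r ≠ 0 ∧ pvExp r ≤ fuel := ?_
        · rw [ih (pvSplitPass parts) hnext,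
            pvSplitPass_expand parts (fun p hp => (h p hp).1)]
        intro r hr
        obtain ⟨p, hp, hcase⟩ := pvSplitPass_mem parts r hr
        obtain ⟨hp0, hle⟩ := h p hp
        rcases hcase with ⟨ho, hr⟩ | ⟨he, hr⟩
        · rw [hr]
          refine ⟨hp0, ?_⟩
          have : pvExp p = 0 := by
            unfold pvExp; rw [pvOddCore_odd ho]
          omega
        · rw [hr]
          obtain ⟨_, _, hqn, _⟩ := pv_half_facts hp0 he
          refine ⟨hqn, ?_⟩
          have := (pvOddCore_even hp0 he).2
          omega
      · rw [pvSplitLoop, if_neg hany]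
        have hodd : ∀ p ∈ parts, PySem.Int.mod p 2 ≠ 0 := by
          intro p hp he
          exact hany (List.any_eq_true.mpr ⟨p, hp, decide_eq_true he⟩)
        exact (pv_flatMap_expand_of_odd parts hodd).symm

-- ---- A's dict aggregation (as before) ----

lemma pv_getD_fold (l : List Int) (d : PySem.Dict Int Int) (k : Int) :
    (l.foldl (fun d part => d.modify (pvOddCore part 0).1 0 (fun v => v + 2 ^ (pvOddCore part 0).2)) d).getD k 0
      = d.getD k 0 + pvS l k := by
  induction l generalizing d with
  | nil => simp [pvS]
  | cons x l ih =>
      rw [List.foldl_cons, ih, PySem.Dict.getD_modify, pvS_cons]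
      have hc : (pvOddCore x 0).1 = pvCore x := rfl
      have hw : (2 : Int) ^ (pvOddCore x 0).2 = pvWt x := rfl
      rw [hc, hw]
      by_cases hx : pvCore x = k
      · subst hx
        rw [if_pos rfl, if_pos rfl]
        ring
      · rw [if_neg (fun h => hx h.symm), if_neg hx]

lemma pv_keys_fold (partition : List Int) :
    (partition.foldl (fun d part => d.modify (pvOddCore part 0).1 0 (fun v => v + 2 ^ (pvOddCore part 0).2)) (PySem.Dict.empty : PySem.Dict Int Int)).keys
      = PySem.Set.ofList (partition.map pvCore) := by
  have h := PySem.Dict.keys_foldl_modify_key (ν := Int) partition (fun part => (pvOddCore part 0).1) 0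
      (fun d part => fun v => v + 2 ^ (pvOddCore part 0).2) PySem.Dict.empty
  simpa [pvCore] using h

-- insertBy only looks at comparisons of x with members of acc
lemma pv_insertBy_congr {α : Type} (b1 b2 : α → α → Bool) (x : α) (acc : List α)
    (h : ∀ y ∈ acc, b1 x y = b2 x y) :
    PySem.List.insertBy b1 x acc = PySem.List.insertBy b2 x acc := by
  induction acc with
  | nil => rfl
  | cons y ys ih =>
      have hy := h y (by simp)
      simp only [PySem.List.insertBy, hy]
      by_cases hb : b2 x y = true
      · simp [hb]
      · simp only [hb]
        have := ih (fun z hz => h z (by simp [hz]))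
        rw [this]

lemma pv_foldl_insertBy_congr {α : Type} (b1 b2 : α → α → Bool) :
    ∀ (l acc : List α),
      (∀ x ∈ l, ∀ y, (y ∈ acc ∨ y ∈ l) → b1 x y = b2 x y) →
      l.foldl (fun a x => PySem.List.insertBy b1 x a) acc
        = l.foldl (fun a x => PySem.List.insertBy b2 x a) acc := by
  intro l
  induction l with
  | nil => intro acc _; rfl
  | cons x l ih =>
      intro acc h
      simp only [List.foldl_cons]
      rw [pv_insertBy_congr b1 b2 x acc (fun y hy => h x (by simp) y (Or.inl hy))]
      apply ih
      intro x' hx' y hy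
      apply h x' (by simp [hx'])
      rcases hy with hy | hy
      · rcases (PySem.List.mem_insertBy _ _ _ _).mp hy with rfl | hy
        · exact Or.inr (by simp)
        · exact Or.inl hy
      · exact Or.inr (by simp [hy])

-- with pairwise-distinct first components, the lexicographic reverse sort is the fst reverse sort
lemma pv_sorted2_eq (xs : List (Int × Int)) (h : (xs.map Prod.fst).Nodup) :
    PySem.List.sorted2 xs (fun pv => pv.1) (fun pv => pv.2) true
      = PySem.List.sorted xs (fun pv => pv.1) true := by
  rw [PySem.List.sorted_rev_eq_foldl_insertBy]
  show xs.foldl (fun acc x => PySem.List.insertBy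
      (fun a b => decide (b.1 < a.1) || !decide (a.1 < b.1) && decide (b.2 < a.2)) x acc) []
    = _
  apply pv_foldl_insertBy_congr
  intro x hx y hy
  rcases hy with hy | hy
  · simp at hy
  · by_cases hxy : x.1 = y.1
    · have : x = y := by
        have hinj := List.inj_on_of_nodup_map h
        exact hinj hx hy hxy
      subst this
      simp
    · rcases lt_or_gt_of_ne hxy with hlt | hlt
      · simp [not_lt_of_gt hlt, hlt]
      · simp [hlt, not_lt.mpr hlt.le]

-- sum of a one-point pattern over a Nodup list
lemma pv_sum_ite (a : Int) (c : Int → Nat) :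
    ∀ (l : List Int), l.Nodup →
      (l.map (fun k => if k = a then c k else 0)).sum = if a ∈ l then c a else 0 := by
  intro l
  induction l with
  | nil => simp
  | cons x l ih =>
      intro hnd
      obtain ⟨hx_not, hl⟩ := List.nodup_cons.mp hnd
      simp only [List.map_cons, List.sum_cons, ih hl]
      by_cases hx : x = a
      · subst hx
        simp [hx_not]
      · simp [hx, Ne.symm hx]

-- (pvS l a).toNat as a Nat-level sum over l
lemma pv_toNat_S (a : Int) :
    ∀ (l : List Int),
      (pvS l a).toNat = (l.map (fun part => if pvCore part = a then (pvWt part).toNat else 0)).sum := by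
  intro l
  induction l with
  | nil => simp [pvS]
  | cons x l ih =>
      rw [pvS_cons, List.map_cons, List.sum_cons]
      by_cases hx : pvCore x = a
      · rw [if_pos hx, if_pos hx, Int.toNat_add (pvWt_pos x).le (pvS_nonneg l a), ih]
      · rw [if_neg hx, if_neg hx, ih, Nat.zero_add]

lemma pv_sum_zero_of_not_mem (a : Int) (l : List Int) (h : a ∉ l.map pvCore) :
    (l.map (fun part => if pvCore part = a then (pvWt part).toNat else 0)).sum = 0 := by
  apply List.sum_eq_zero
  intro x hx
  obtain ⟨p, hp, rfl⟩ := List.mem_map.mp hx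
  have : pvCore p ≠ a := fun he => h (List.mem_map.mpr ⟨p, hp, he⟩)
  simp [this]

-- descending blocks of equal values are pairwise-descending after flattening
lemma pv_pairwise_blocks (c : Int → Nat) :
    ∀ (ks : List Int), ks.Pairwise (fun a b => b < a) →
      ((ks.map (fun k => List.replicate (c k) k)).flatten).Pairwise (fun a b : Int => b ≤ a) := by
  intro ks hks
  rw [List.pairwise_flatten]
  constructor
  · intro l hl
    obtain ⟨k, _, rfl⟩ := List.mem_map.mp hl
    exact List.pairwise_replicate.mpr (Or.inr le_rfl)
  · rw [List.pairwise_map]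
    refine hks.imp_of_mem ?_
    intro k1 k2 _ _ hlt x hx y hy
    rw [List.eq_of_mem_replicate hx, List.eq_of_mem_replicate hy]
    exact hlt.le

-- the two flat multisets agree
lemma pv_perm (partition : List Int) :
    let K := PySem.Set.ofList (partition.map pvCore)
    let ys := PySem.List.sorted K (fun x => x) true
    ((ys.map (fun k => List.replicate (pvS partition k).toNat k)).flatten).Perm
      (partition.flatMap pvExpand) := by
  intro K ys
  have hysK : ys.Perm K := PySem.List.sorted_perm K (fun x => x) true
  have hysnd : ys.Nodup := hysK.nodup_iff.mpr (PySem.Set.nodup_ofList _)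
  rw [List.perm_iff_count]
  intro a
  rw [List.count_flatten, List.flatMap_def, List.count_flatten]
  simp only [List.map_map, Function.comp_def, pvExpand, List.count_replicate, beq_iff_eq]
  rw [pv_sum_ite a (fun k => (pvS partition k).toNat) ys hysnd]
  by_cases ha : a ∈ partition.map pvCore
  · have hays : a ∈ ys := (PySem.List.mem_sorted _ _ _ _).mpr ((PySem.Set.mem_ofList _ _).mpr ha)
    simp only [hays, if_true]
    rw [pv_toNat_S a partition]
  · have hays : a ∉ ys := fun h =>
      ha ((PySem.Set.mem_ofList _ _).mp ((PySem.List.mem_sorted _ _ _ _).mp h))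
    simp only [hays, if_false]
    exact (pv_sum_zero_of_not_mem a partition ha).symm

lemma pv_foldl_append (L : List (List Int)) (acc : List Int) :
    L.foldl (fun a x => a ++ x) acc = acc ++ L.flatten := by
  induction L generalizing acc with
  | nil => simp
  | cons x L ih => simp [ih]

-- ===== VERDICT (by name: the statement is the Claim_ definition above) =====
theorem unique_to_odd_spec : Claim_equal_unique_to_odd := by
  intro partition _ hpre
  obtain ⟨_, h0⟩ := hpre
  unfold Spec_unique_to_odd unique_to_odd unique_to_odd_alt
  -- B's side: the split loop computes the flat expansion
  have hB : pvSplitLoop (partition.map Int.natAbs).sum partition = partition.flatMap pvExpand := by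
    apply pvSplitLoop_eq
    intro p hp
    refine ⟨fun h => h0 (h ▸ hp), ?_⟩
    calc pvExp p ≤ p.natAbs := pvExp_le_natAbs p
      _ ≤ (partition.map Int.natAbs).sum :=
          List.single_le_sum (fun x _ => Nat.zero_le x) _ (List.mem_map.mpr ⟨p, hp, rfl⟩)
  rw [hB]
  -- A's side
  set m : PySem.Dict Int Int := partition.foldl
      (fun d part => d.modify (pvOddCore part 0).1 0 (fun v => v + 2 ^ (pvOddCore part 0).2))
      PySem.Dict.empty with hm
  have hkeys : m.keys = PySem.Set.ofList (partition.map pvCore) := by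
    rw [hm]; exact pv_keys_fold partition
  have hnd : m.keys.Nodup := by rw [hkeys]; exact PySem.Set.nodup_ofList _
  have hfst : m.items.map Prod.fst = m.keys := rfl
  have hndf : (m.items.map Prod.fst).Nodup := by rw [hfst]; exact hnd
  have hitems : m.items = m.keys.map (fun k => (k, m.getD k 0)) :=
    PySem.Dict.items_eq_map_keys m hnd 0
  have hgetD : ∀ k, m.getD k 0 = pvS partition k := by
    intro k
    rw [hm, pv_getD_fold]
    simp [PySem.Dict.getD_empty]
  rw [pv_sorted2_eq m.items hndf]
  have hysK : (PySem.List.sorted (PySem.Set.ofList (partition.map pvCore)) (fun x => x) true).Perm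
      (PySem.Set.ofList (partition.map pvCore)) := PySem.List.sorted_perm _ _ _
  set K := PySem.Set.ofList (partition.map pvCore) with hK
  set ys := PySem.List.sorted K (fun x => x) true with hys
  have hysnd : ys.Nodup := hysK.nodup_iff.mpr (PySem.Set.nodup_ofList _)
  have hge : ys.Pairwise (fun a b => b ≤ a) := PySem.List.sorted_pairwise_rev K (fun x => x)
  have hstrict : ys.Pairwise (fun a b => b < a) := by
    have h2 : ys.Pairwise (fun a b : Int => a ≠ b) := hysnd
    exact (hge.and h2).imp (fun h => lt_of_le_of_ne h.1 (Ne.symm h.2))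
  have hsorted : PySem.List.sorted m.items (fun pv => pv.1) true
      = ys.map (fun k => (k, m.getD k 0)) := by
    apply PySem.List.sorted_rev_eq_of_perm_of_pairwise_gt
    · rw [hitems, hkeys]
      exact hysK.map _
    · rw [List.pairwise_map]
      exact hstrict
  rw [hsorted, List.map_map]
  have hA : (fun pv : Int × Int => PySem.List.pyRepeat [pv.1] pv.2) ∘ (fun k => (k, m.getD k 0))
      = fun k => List.replicate (pvS partition k).toNat k := by
    funext k
    simp [Function.comp, PySem.List.pyRepeat_singleton, hgetD k]
  rw [hA, pv_foldl_append, List.nil_append]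
  apply List.Perm.eq_of_pairwise (le := fun a b : Int => b ≤ a)
  · intro a b _ _ h1 h2
    omega
  · exact pv_pairwise_blocks _ ys hstrict
  · exact PySem.List.sorted_pairwise_rev _ _
  · exact (pv_perm partition).trans (PySem.List.sorted_perm _ _ _).symm
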